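-- pv_equiv track=rewrite | github.com/TheRealMarcusChiu/nlp-project | mahsa/nlp2.py | possible_relations
-- ===== SOURCE A (Python) =====
-- def possible_relations(data):
--     relation_types = {}
--     index = -1
--     for i in range(len(data)-1):
--         dict_key = data[i].split("\n")[1].split("(")[0]
--         if relation_types.get(dict_key) is None:
--             index += 1
--             relation_types[dict_key] = index
--     return relation_types
-- ===== SOURCE B (Python) =====
-- def possible_relations(data):
--     # keys of all rows except the last
--     keys = [row.split("\n")[1].split("(")[0] for row in data[:-1]]
--     # peel off the leading key, record it with the next index, and filter
--     # all its later copies out of the remainder; repeat until nothing is left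
--     pairs = []
--     remaining = keys
--     while remaining:
--         head = remaining[0]
--         pairs.append((head, len(pairs)))
--         remaining = [k for k in remaining[1:] if k != head]
--     return dict(pairs)
-- ===== Notes on version B (the rewrite author's own statement) =====
-- stated objective: alternative
-- what changed: B replaces A's single guarded pass threading a dict and a manual counter with a peeling algorithm: it extracts all keys first, then repeatedly takes the leading key of the remainder, records it with the next index, and filters every later copy of it out before continuing, so no first-seen membership test and no counter variable are needed.
import Mathlib
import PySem

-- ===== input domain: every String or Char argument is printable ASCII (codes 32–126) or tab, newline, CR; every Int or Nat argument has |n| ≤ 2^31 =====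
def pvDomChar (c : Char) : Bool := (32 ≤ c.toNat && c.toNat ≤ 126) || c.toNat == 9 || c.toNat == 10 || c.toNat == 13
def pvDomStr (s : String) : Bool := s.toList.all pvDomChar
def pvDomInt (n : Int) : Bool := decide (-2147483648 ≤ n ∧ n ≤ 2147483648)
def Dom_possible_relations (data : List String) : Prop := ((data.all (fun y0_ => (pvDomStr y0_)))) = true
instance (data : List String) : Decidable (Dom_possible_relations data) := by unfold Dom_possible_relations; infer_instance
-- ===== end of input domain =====

-- B replaces A's guarded dict-and-counter pass by a peeling algorithm (record the leading key,
-- filter its copies out of the remainder, repeat); same values, no speed claim.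

-- key of one row: row.split("\n")[1].split("(")[0]. The separators are nonempty so split? is
-- always `some` (`.getD []` is never the default); [1] may raise IndexError (modelled as none);
-- [0] of a split result never raises (split returns ≥ 1 piece), so it is the head.
def pvRowKey? (row : String) : Option String :=
  (PySem.List.pyGet? ((PySem.Str.split? row "\n").getD []) 1).map
    (fun t => ((PySem.Str.split? t "(").getD []).headD "")

-- ===== PORT A =====
def possible_relations (data : List String) : List (String × Int) :=
  ((PySem.List.pyRange 0 ((data.length : Int) - 1) 1).foldl
    (fun (st : PySem.Dict String Int × Int) i =>
      match PySem.List.pyGet? data i with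
      | none => st            -- unreachable: 0 ≤ i < len(data)-1
      | some row =>
        match pvRowKey? row with
        | none => st          -- IndexError in Python (row has no '\n'); excluded by Pre_
        | some k =>
          if st.1.get? k = none then (st.1.insert k (st.2 + 1), st.2 + 1) else st)
    (PySem.Dict.empty, -1)).1.items

-- ===== PORT B =====
-- the while loop of Source B: peel the leading key, filter its later copies out, recurse
def pvPeel : List String → List (String × Int) → List (String × Int)
  | [], pairs => pairs
  | head :: rest, pairs =>
      pvPeel (rest.filter (fun k => k ≠ head)) (pairs ++ [(head, (pairs.length : Int))])
termination_by rem _ => rem.length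
decreasing_by
  simp only [List.length_unattach, List.length_cons]
  exact Nat.lt_succ_of_le (le_trans (List.length_filter_le _ _) (le_of_eq List.length_attach))

def possible_relations_alt (data : List String) : List (String × Int) :=
  let keys := (PySem.List.slice data none (some (-1))).map (fun row => (pvRowKey? row).getD "")
  (PySem.Dict.ofList (pvPeel keys [])).items

-- ===== PRECONDITION & SPEC =====
-- Pre_ excludes exactly the inputs on which A raises IndexError: some row other than the last
-- contains no newline, so row.split("\n")[1] is out of range.
def Pre_possible_relations (data : List String) : Prop :=
  ∀ row ∈ data.dropLast, 2 ≤ ((PySem.Str.split? row "\n").getD []).length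
instance (data : List String) : Decidable (Pre_possible_relations data) := by
  unfold Pre_possible_relations; infer_instance
def pvWitness_possible_relations : List String := ["a\nr(1)", "b\ns(2)", "a\nr(3)", "last"]

def Spec_possible_relations (data : List String) (out : List (String × Int)) : Prop := out = possible_relations_alt data
instance (data : List String) (out : List (String × Int)) : Decidable (Spec_possible_relations data out) := by unfold Spec_possible_relations; infer_instance

-- ===== CLAIM (what is proved, stated in full; the proofs are below) =====
def Claim_equal_possible_relations : Prop := ∀ (data : List String), Dom_possible_relations data → Pre_possible_relations data → Spec_possible_relations data (possible_relations data)

-- ===== LEMMAS AND PROOFS =====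

-- A's loop body, on an already-extracted key
def pvStep (st : PySem.Dict String Int × Int) (k : String) : PySem.Dict String Int × Int :=
  if st.1.get? k = none then (st.1.insert k (st.2 + 1), st.2 + 1) else st

-- the key of a row, total (equals pvRowKey? under Pre_)
def pvKeyF (row : String) : String := (pvRowKey? row).getD ""

theorem pv_filter_discard (p : String → Bool) (k : String) (hp : p k = false) (s : List String) :
    (PySem.Set.discard s k).filter p = s.filter p := by
  simp only [PySem.Set.discard, List.filter_filter]
  apply List.filter_congr
  intro y _
  by_cases hy : y = k
  · subst hy; simp [hp]
  · simp [hy]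

-- ---- A-side characterisation: the fold's items are the first-occurrence keys enumerated ----
theorem pv_loop_items (ks : List String) : ∀ (d : PySem.Dict String Int), d.keys.Nodup →
    ((ks.foldl pvStep (d, (d.size : Int) - 1)).1).items
      = d.items ++ (PySem.List.enumerate
          ((PySem.Set.ofList ks).filter (fun k => !(d.contains k))) (d.size : Int)).map
          (fun p => (p.2, p.1)) := by
  induction ks with
  | nil => intro d _; simp [PySem.Set.ofList_nil, PySem.List.enumerate_nil]
  | cons k ks ih =>
    intro d hnd
    rw [List.foldl_cons]
    by_cases hc : d.contains k = true
    · have hg : ¬ (d.get? k = none) := by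
        rw [PySem.Dict.get?_eq_none_iff_contains]; simp [hc]
      rw [show pvStep (d, (d.size : Int) - 1) k = (d, (d.size : Int) - 1) from by
        simp [pvStep, hg]]
      rw [ih d hnd, PySem.Set.ofList_cons,
        List.filter_cons_of_neg (by simp [hc]),
        pv_filter_discard _ _ (by simp [hc])]
    · have hcf : d.contains k = false := by simpa using hc
      have hg : d.get? k = none := (PySem.Dict.get?_eq_none_iff_contains d k).mpr hcf
      rw [show pvStep (d, (d.size : Int) - 1) k
            = (d.insert k ((d.size : Int)), (d.size : Int)) from by
        simp [pvStep, hg, sub_add_cancel]]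
      have hsz : ((d.insert k ((d.size : Int))).size : Int) = (d.size : Int) + 1 := by
        rw [PySem.Dict.size_insert]; simp [hcf]
      have hi2 := ih (d.insert k ((d.size : Int)))
        (PySem.Dict.nodup_keys_insert d k _ hnd)
      rw [hsz, add_sub_cancel_right] at hi2
      rw [hi2, PySem.Dict.items_insert_of_not_contains d _ hcf]
      have hfilt : (PySem.Set.ofList ks).filter
            (fun k' => !((d.insert k ((d.size : Int))).contains k'))
          = ((PySem.Set.ofList ks).discard k).filter (fun k' => !(d.contains k')) := by
        simp only [PySem.Set.discard, List.filter_filter]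
        apply List.filter_congr
        intro y _
        rw [PySem.Dict.contains_insert]
        by_cases hy : y = k <;> simp [hy, Bool.and_comm]
      rw [hfilt, PySem.Set.ofList_cons,
        List.filter_cons_of_pos (by simp [hcf]),
        PySem.List.enumerate_cons]
      simp

theorem pv_A_eq_fold (data : List String) (hpre : Pre_possible_relations data) :
    possible_relations data
      = (((data.dropLast.map pvKeyF).foldl pvStep (PySem.Dict.empty, -1)).1).items := by
  unfold possible_relations
  have hrange : PySem.List.pyRange 0 ((data.length : Int) - 1) 1
      = PySem.List.pyRange 0 ((data.dropLast.length : Int)) 1 := by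
    rw [PySem.List.pyRange_one, PySem.List.pyRange_one]
    congr 2
    simp [List.length_dropLast]
  have hcong : ∀ (acc : PySem.Dict String Int × Int),
      ∀ i ∈ PySem.List.pyRange 0 ((data.dropLast.length : Int)) 1,
      (match PySem.List.pyGet? data i with
        | none => acc
        | some row =>
          match pvRowKey? row with
          | none => acc
          | some k =>
            if acc.1.get? k = none then (acc.1.insert k (acc.2 + 1), acc.2 + 1) else acc)
        = pvStep acc (pvKeyF (PySem.List.pyGetD data.dropLast i "")) := by
    intro acc i hi
    obtain ⟨h0, hlt⟩ := PySem.List.mem_pyRange_one.mp hi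
    obtain ⟨n, rfl⟩ := Int.eq_ofNat_of_zero_le h0
    have hn : n < data.dropLast.length := by exact_mod_cast hlt
    have hn' : n < data.length := lt_of_lt_of_le hn (by simp [List.length_dropLast])
    have hget : PySem.List.pyGet? data (n : Int) = some (data.dropLast[n]) := by
      rw [PySem.List.pyGet?_natCast]
      simp [List.getElem?_eq_getElem hn', List.getElem_dropLast]
    have hgetD : PySem.List.pyGetD data.dropLast (n : Int) "" = data.dropLast[n] := by
      rw [PySem.List.pyGetD_natCast]
      exact List.getD_eq_getElem _ _ hn
    have hmem : data.dropLast[n] ∈ data.dropLast := List.getElem_mem hn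
    have hk : pvRowKey? (data.dropLast[n]) = some (pvKeyF (data.dropLast[n])) := by
      have h2 := hpre _ hmem
      cases hx : PySem.List.pyGet? ((PySem.Str.split? data.dropLast[n] "\n").getD []) 1 with
      | none =>
          exfalso
          rw [show (1 : Int) = ((1 : Nat) : Int) from rfl, PySem.List.pyGet?_natCast] at hx
          rw [List.getElem?_eq_none_iff] at hx
          omega
      | some t => simp only [pvRowKey?, pvKeyF, hx, Option.map_some, Option.getD_some]
    rw [hget, hgetD]
    simp only [hk, pvStep]
  rw [hrange, PySem.List.foldl_congr_mem _ _ _ _ hcong,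
    PySem.List.foldl_pyRange_zero_pyGetD' data.dropLast ""
      (fun st row => pvStep st (pvKeyF row)) (PySem.Dict.empty, -1),
    List.foldl_map]

-- ---- B-side: filtering a key out commutes with first-occurrence dedup ----
theorem pv_ofList_filter_ne (l : List String) (h : String) :
    PySem.Set.ofList (l.filter (fun k => k ≠ h)) = PySem.Set.discard (PySem.Set.ofList l) h := by
  induction l with
  | nil => simp [PySem.Set.ofList_nil, PySem.Set.discard]
  | cons x xs ih =>
    by_cases hx : x = h
    · subst hx
      rw [List.filter_cons_of_neg (by simp), ih, PySem.Set.ofList_cons]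
      simp only [PySem.Set.discard]
      rw [List.filter_cons_of_neg (by simp), List.filter_filter]
      apply List.filter_congr
      intro y _; simp [Bool.and_self]
    · rw [List.filter_cons_of_pos (by simp [hx]), PySem.Set.ofList_cons, PySem.Set.ofList_cons, ih]
      simp only [PySem.Set.discard]
      rw [List.filter_cons_of_pos (by simp [hx])]
      congr 1
      simp only [List.filter_filter]
      apply List.filter_congr
      intro y _
      exact Bool.and_comm _ _

-- ---- B-side characterisation: peeling also enumerates the first-occurrence keys ----
theorem pv_peel_eq (n : Nat) : ∀ (rem : List String), rem.length ≤ n → ∀ (pairs : List (String × Int)),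
    pvPeel rem pairs
      = pairs ++ (PySem.List.enumerate (PySem.Set.ofList rem) ((pairs.length : Int))).map
          (fun p => (p.2, p.1)) := by
  induction n with
  | zero =>
    intro rem hlen pairs
    have : rem = [] := List.eq_nil_of_length_eq_zero (Nat.le_zero.mp hlen)
    subst this
    rw [pvPeel]
    simp [PySem.Set.ofList_nil, PySem.List.enumerate_nil]
  | succ n ih =>
    intro rem hlen pairs
    match rem with
    | [] =>
      rw [pvPeel]
      simp [PySem.Set.ofList_nil, PySem.List.enumerate_nil]
    | head :: rest =>
      rw [show pvPeel (head :: rest) pairs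
            = pvPeel (rest.filter (fun k => k ≠ head)) (pairs ++ [(head, (pairs.length : Int))])
          from by rw [pvPeel]]
      rw [ih _ (le_trans (List.length_filter_le _ _) (by simpa using hlen)) _]
      rw [pv_ofList_filter_ne, PySem.Set.ofList_cons, PySem.List.enumerate_cons]
      simp

-- ---- keys of the peeled pairs are exactly the dedup, hence Nodup ----
theorem pv_peel_keys_nodup (ks : List String) :
    ((pvPeel ks []).map Prod.fst).Nodup := by
  rw [pv_peel_eq ks.length ks le_rfl []]
  have : ((PySem.List.enumerate (PySem.Set.ofList ks) ((0 : Int))).map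
      (fun p : Int × String => (p.2, p.1))).map Prod.fst = PySem.Set.ofList ks := by
    rw [List.map_map]
    exact PySem.List.map_snd_enumerate _ _
  simp [this, PySem.Set.nodup_ofList ks]

-- ===== VERDICT (by name: the statement is the Claim_ definition above) =====
theorem possible_relations_spec : Claim_equal_possible_relations := by
  intro data _ hpre
  unfold Spec_possible_relations
  rw [pv_A_eq_fold data hpre]
  have h0 : ((-1 : Int)) = (((PySem.Dict.empty : PySem.Dict String Int).size : Int) - 1) := by
    simp [PySem.Dict.size_empty]
  rw [h0, pv_loop_items _ PySem.Dict.empty PySem.Dict.nodup_keys_empty]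
  have halt : possible_relations_alt data
      = (PySem.Dict.ofList (pvPeel (data.dropLast.map pvKeyF) [])).items := by
    simp only [possible_relations_alt, PySem.List.slice_to_neg_one]
    rfl
  rw [halt]
  set ks := data.dropLast.map pvKeyF with hks
  have e : PySem.Dict.ofList (pvPeel ks [])
      = (pvPeel ks []).foldl (fun d p => d.insert p.1 p.2) PySem.Dict.empty := rfl
  have hitems := PySem.Dict.items_foldl_insert_fresh (l := pvPeel ks []) (k := Prod.fst)
    (v := Prod.snd) (d := PySem.Dict.empty)
    (by intro a _; exact PySem.Dict.contains_empty _) (pv_peel_keys_nodup ks)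
  rw [e, hitems, pv_peel_eq ks.length ks le_rfl []]
  simp [PySem.Dict.size_empty, PySem.Dict.contains_empty]
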